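-- pv_equiv track=rewrite | github.com/Kris465/MemoryBox | old_projects/RPO/block7/task54.py | find_last_max_min_indices
-- ===== SOURCE A (Python) =====
-- def find_last_max_min_indices(numbers):
--     if not numbers:
--         return -1, -1
--
--     # Инициализация
--     max_num = min_num = numbers[0]
--     max_index = min_index = 0
--
--     # Поиск индексов
--     for i, num in enumerate(numbers):
--         if num >= max_num:  # Используем >= для последнего максимума
--             max_num = num
--             max_index = i
--         if num <= min_num:  # Используем <= для последнего минимума
--             min_num = num
--             min_index = i
--
--     return max_index, min_index
-- ===== SOURCE B (Python) =====
-- def find_last_max_min_indices(numbers):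
--     if not numbers:
--         return -1, -1
--     mx = max(numbers)
--     mn = min(numbers)
--     n = len(numbers)
--     rev = numbers[::-1]
--     return n - 1 - rev.index(mx), n - 1 - rev.index(mn)
-- ===== Notes on version B (the rewrite author's own statement) =====
-- stated objective: simpler
-- what changed: Replaces the single combined index-tracking loop over enumerate with 'compute max and min, then find the last occurrence of each via .index on the reversed list'.
import Mathlib
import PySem

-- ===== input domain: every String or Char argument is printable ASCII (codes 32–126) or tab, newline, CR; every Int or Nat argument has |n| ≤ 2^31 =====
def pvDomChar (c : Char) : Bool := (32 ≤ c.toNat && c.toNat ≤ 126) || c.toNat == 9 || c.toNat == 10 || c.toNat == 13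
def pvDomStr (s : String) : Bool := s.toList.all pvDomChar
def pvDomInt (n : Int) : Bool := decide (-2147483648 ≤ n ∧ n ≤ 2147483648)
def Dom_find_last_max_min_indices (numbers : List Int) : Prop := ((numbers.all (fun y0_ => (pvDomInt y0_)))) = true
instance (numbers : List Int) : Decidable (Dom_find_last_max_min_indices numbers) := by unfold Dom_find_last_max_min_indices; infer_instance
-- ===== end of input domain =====

-- B replaces A's combined tracking loop by 'compute max/min, then last index via reversed .index' (objective: simpler).

-- ===== PORT A =====
-- one combined loop over enumerate, tracking (max_num, max_index, min_num, min_index)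
def find_last_max_min_indices (numbers : List Int) : Int × Int :=
  match numbers with
  | [] => (-1, -1)
  | x :: _ =>
    let st := (PySem.List.enumerate numbers 0).foldl
      (fun (s : Int × Int × Int × Int) p =>
        let s1 := if p.2 ≥ s.1 then (p.2, p.1, s.2.2.1, s.2.2.2) else s
        if p.2 ≤ s1.2.2.1 then (s1.1, s1.2.1, p.2, p.1) else s1)
      (x, 0, x, 0)
    (st.2.1, st.2.2.2)

-- ===== PORT B =====
-- mx = max(numbers); mn = min(numbers); rev = numbers[::-1]; indices n-1-rev.index(...)
-- (max/min/index cannot fail here: numbers is nonempty and mx, mn ∈ numbers, so the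
--  none branches of the Option-returning primitives are unreachable; 0 / -1 are placeholders)
def find_last_max_min_indices_alt (numbers : List Int) : Int × Int :=
  if numbers = [] then (-1, -1)
  else
    let mx := (PySem.List.max? numbers (fun y => y)).getD 0
    let mn := (PySem.List.min? numbers (fun y => y)).getD 0
    let n : Int := numbers.length
    let rev := numbers.reverse
    (n - 1 - (((PySem.List.index? rev mx).map (Int.ofNat)).getD (-1)),
     n - 1 - (((PySem.List.index? rev mn).map (Int.ofNat)).getD (-1)))

-- ===== PRECONDITION & SPEC =====
def Spec_find_last_max_min_indices (numbers : List Int) (out : Int × Int) : Prop := out = find_last_max_min_indices_alt numbers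
instance (numbers : List Int) (out : Int × Int) : Decidable (Spec_find_last_max_min_indices numbers out) := by unfold Spec_find_last_max_min_indices; infer_instance

-- ===== CLAIM (what is proved, stated in full; the proofs are below) =====
def Claim_equal_find_last_max_min_indices : Prop := ∀ (numbers : List Int), Dom_find_last_max_min_indices numbers → Spec_find_last_max_min_indices numbers (find_last_max_min_indices numbers)

-- ===== LEMMAS AND PROOFS =====

-- index (from the left) of the LAST occurrence of v in l, as an Int
def pvLastIdx (l : List Int) (v : Int) : Int :=
  (l.length : Int) - 1 - (l.reverse.idxOf v : Int)

def pvStep (s : Int × Int × Int × Int) (p : Int × Int) : Int × Int × Int × Int :=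
  let s1 := if p.2 ≥ s.1 then (p.2, p.1, s.2.2.1, s.2.2.2) else s
  if p.2 ≤ s1.2.2.1 then (s1.1, s1.2.1, p.2, p.1) else s1

theorem pvLastIdx_append_self (l : List Int) (y : Int) :
    pvLastIdx (l ++ [y]) y = (l.length : Int) := by
  simp [pvLastIdx]

theorem pvLastIdx_append_ne (l : List Int) (y v : Int) (h : y ≠ v) :
    pvLastIdx (l ++ [y]) v = pvLastIdx l v := by
  simp only [pvLastIdx, List.reverse_append, List.reverse_singleton, List.singleton_append,
    List.idxOf_cons_ne _ h, List.length_append, List.length_singleton]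
  push_cast
  ring

theorem pvFold_state (x : Int) (t : List Int) :
    (PySem.List.enumerate (x :: t) 0).foldl pvStep (x, 0, x, 0) =
      (t.foldl max x, pvLastIdx (x :: t) (t.foldl max x),
       t.foldl min x, pvLastIdx (x :: t) (t.foldl min x)) := by
  induction t using List.reverseRecOn with
  | nil => simp [PySem.List.enumerate, pvStep, pvLastIdx]
  | append_singleton t y ih =>
    have hx : x :: (t ++ [y]) = (x :: t) ++ [y] := rfl
    rw [hx, PySem.List.enumerate_append, List.foldl_append, ih]
    have hmax : (t ++ [y]).foldl max x = max (t.foldl max x) y := by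
      simp [List.foldl_append]
    have hmin : (t ++ [y]).foldl min x = min (t.foldl min x) y := by
      simp [List.foldl_append]
    simp only [PySem.List.enumerate, List.foldl_cons, List.foldl_nil]
    rw [hmax, hmin]
    unfold pvStep
    rcases le_or_gt (t.foldl max x) y with hge | hlt
    · have hmx : max (t.foldl max x) y = y := max_eq_right hge
      rcases le_or_gt y (t.foldl min x) with hle | hgt
      · -- y is both the new max and the new min
        have hmn : min (t.foldl min x) y = y := min_eq_right hle
        simp only [ge_iff_le, hge, if_pos, hle, if_pos, hmx, hmn,
          pvLastIdx_append_self]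
        simp
      · -- y is the new max only
        have hne : y ≠ t.foldl min x := ne_of_gt hgt
        have hmn : min (t.foldl min x) y = t.foldl min x := min_eq_left (le_of_lt hgt)
        simp only [ge_iff_le, hge, if_pos, if_neg (not_le.mpr hgt), hmx, hmn,
          pvLastIdx_append_self, pvLastIdx_append_ne _ _ _ hne]
        simp
    · have hney : y ≠ t.foldl max x := ne_of_lt hlt
      have hmx : max (t.foldl max x) y = t.foldl max x := max_eq_left (le_of_lt hlt)
      rcases le_or_gt y (t.foldl min x) with hle | hgt
      · -- y is the new min only
        have hmn : min (t.foldl min x) y = y := min_eq_right hle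
        simp only [ge_iff_le, if_neg (not_le.mpr hlt), hle, if_pos, hmx, hmn,
          pvLastIdx_append_self, pvLastIdx_append_ne _ _ _ hney]
        simp
      · -- y is neither
        have hnem : y ≠ t.foldl min x := ne_of_gt hgt
        have hmn : min (t.foldl min x) y = t.foldl min x := min_eq_left (le_of_lt hgt)
        simp only [ge_iff_le, if_neg (not_le.mpr hlt), if_neg (not_le.mpr hgt), hmx, hmn,
          pvLastIdx_append_ne _ _ _ hney,
          pvLastIdx_append_ne _ _ _ hnem]

theorem pv_idxOf?_of_mem (l : List Int) (v : Int) (h : v ∈ l) :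
    List.idxOf? v l = some (l.idxOf v) := by
  induction l with
  | nil => simp at h
  | cons a t ih =>
    by_cases hv : a = v
    · subst hv; simp [List.idxOf?_cons]
    · have hm : v ∈ t := by simpa [Ne.symm hv] using h
      have hb : (a == v) = false := by simp [hv]
      simp [List.idxOf?_cons, List.idxOf_cons, hb, ih hm]

theorem pv_index?_reverse (l : List Int) (v : Int) (h : v ∈ l) :
    (((PySem.List.index? l.reverse v).map (Int.ofNat)).getD (-1)) = (l.reverse.idxOf v : Int) := by
  rw [PySem.List.index?_eq_idxOf?]
  have hm : v ∈ l.reverse := by simpa using h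
  rw [pv_idxOf?_of_mem _ _ hm]
  rfl

theorem find_last_max_min_indices_spec : Claim_equal_find_last_max_min_indices := by
  intro numbers _
  unfold Spec_find_last_max_min_indices
  match numbers with
  | [] => rfl
  | x :: t =>
    have hA : find_last_max_min_indices (x :: t) =
        (((PySem.List.enumerate (x :: t) 0).foldl pvStep (x, 0, x, 0)).2.1,
         ((PySem.List.enumerate (x :: t) 0).foldl pvStep (x, 0, x, 0)).2.2.2) := rfl
    have hmaxmem : t.foldl max x ∈ x :: t := by
      rcases PySem.List.foldl_max_mem t x with h | h <;> simp [h]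
    have hminmem : t.foldl min x ∈ x :: t := by
      rcases PySem.List.foldl_min_mem t x with h | h <;> simp [h]
    rw [hA, pvFold_state]
    simp only [find_last_max_min_indices_alt, if_neg (List.cons_ne_nil x t),
      PySem.List.max?_id_cons, PySem.List.min?_id_cons, Option.getD_some]
    rw [pv_index?_reverse _ _ hmaxmem, pv_index?_reverse _ _ hminmem]
    simp [pvLastIdx]
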